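-- pv_equiv track=rewrite | github.com/Elahe-khayatian/k-RF-measures | functions.py | getkRFmeasure_rooted
-- ===== SOURCE A (Python) =====
-- def getkRFmeasure_rooted(P_Total):
--  d_Total=[]
--  for i in range(len(P_Total)):
--   d=[]
--   P_Supp=[]
--   for p in P_Total[i]:
--     if p not in P_Supp:
--        P_Supp.append(p)
--   for j in range(len(P_Total)):
--      d_k=len(P_Total[i])+len(P_Total[j])
--      for p in P_Supp:
--           if P_Total[i].count(p)> P_Total[j].count(p):
--               d_k=d_k-2*(P_Total[j].count(p))
--           else:
--               d_k=d_k-2*(P_Total[i].count(p))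
--      d.append(d_k)
--   d_Total.append(d)
--  return(d_Total)
-- ===== SOURCE B (Python) =====
-- def getkRFmeasure_rooted(P_Total):
--     # Sort each multiset once, then count common elements of each pair by a
--     # linear two-pointer merge of the sorted lists.
--     S = [sorted(part) for part in P_Total]
--     res = []
--     for xs in S:
--         row = []
--         for ys in S:
--             i = j = common = 0
--             while i < len(xs) and j < len(ys):
--                 if xs[i] < ys[j]:
--                     i += 1
--                 elif ys[j] < xs[i]:
--                     j += 1
--                 else:
--                     common += 1
--                     i += 1
--                     j += 1
--             row.append(len(xs) + len(ys) - 2 * common)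
--         res.append(row)
--     return res
-- ===== Notes on version B (the rewrite author's own statement) =====
-- stated objective: faster
-- what changed: B sorts each multiset once and computes each pairwise multiset-intersection size by a two-pointer merge of the two sorted lists, instead of A's per-pair dedup pass with repeated quadratic list.count scans.
import Mathlib
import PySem

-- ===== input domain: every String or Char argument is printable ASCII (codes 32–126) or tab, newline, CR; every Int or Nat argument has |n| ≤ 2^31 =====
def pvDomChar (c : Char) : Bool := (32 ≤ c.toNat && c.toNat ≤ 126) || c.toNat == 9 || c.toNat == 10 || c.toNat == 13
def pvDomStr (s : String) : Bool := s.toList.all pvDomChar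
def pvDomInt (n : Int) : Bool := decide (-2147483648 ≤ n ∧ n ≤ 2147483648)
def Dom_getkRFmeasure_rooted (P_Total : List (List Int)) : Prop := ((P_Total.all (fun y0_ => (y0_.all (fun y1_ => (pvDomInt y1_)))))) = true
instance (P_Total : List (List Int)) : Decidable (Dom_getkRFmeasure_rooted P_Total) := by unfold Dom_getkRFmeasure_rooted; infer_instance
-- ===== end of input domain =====

-- B sorts each multiset once and counts each pair's common elements by a two-pointer
-- merge of the sorted lists (objective: faster — replaces A's repeated list.count scans).

-- ===== PORT A =====
def getkRFmeasure_rooted (P_Total : List (List Int)) : List (List Int) :=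
  (PySem.List.pyRange 0 (P_Total.length : Int) 1).foldl (fun d_Total i =>
    let Pi := PySem.List.pyGetD P_Total i []
    let P_Supp := Pi.foldl (fun acc p => if acc.contains p then acc else acc ++ [p]) []
    let d := (PySem.List.pyRange 0 (P_Total.length : Int) 1).foldl (fun d j =>
      let Pj := PySem.List.pyGetD P_Total j []
      let d_k := P_Supp.foldl (fun d_k p =>
        if (Pi.count p : Int) > (Pj.count p : Int) then
          d_k - 2 * (Pj.count p : Int)
        else
          d_k - 2 * (Pi.count p : Int)) ((Pi.length : Int) + (Pj.length : Int))
      d ++ [d_k]) []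
    d_Total ++ [d]) []

-- ===== PORT B =====
-- the while-loop over two indices, as the obvious structural recursion on the suffixes
def pvCommon : List Int → List Int → Int
  | [], _ => 0
  | _ :: _, [] => 0
  | x :: xs, y :: ys =>
    if x < y then pvCommon xs (y :: ys)
    else if y < x then pvCommon (x :: xs) ys
    else 1 + pvCommon xs ys

def getkRFmeasure_rooted_alt (P_Total : List (List Int)) : List (List Int) :=
  let S := P_Total.map (fun part => PySem.List.sorted part (fun x => x) false)
  S.map (fun xs => S.map (fun ys =>
    (xs.length : Int) + (ys.length : Int) - 2 * pvCommon xs ys))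

-- ===== PRECONDITION & SPEC =====
def Spec_getkRFmeasure_rooted (P_Total : List (List Int)) (out : List (List Int)) : Prop := out = getkRFmeasure_rooted_alt P_Total
instance (P_Total : List (List Int)) (out : List (List Int)) : Decidable (Spec_getkRFmeasure_rooted P_Total out) := by unfold Spec_getkRFmeasure_rooted; infer_instance

-- ===== CLAIM =====
def Claim_equal_getkRFmeasure_rooted : Prop := ∀ (P_Total : List (List Int)), Dom_getkRFmeasure_rooted P_Total → Spec_getkRFmeasure_rooted P_Total (getkRFmeasure_rooted P_Total)

-- ===== LEMMAS AND PROOFS =====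

-- A's index loop 'for i in range(len(P))' reading only P[i] is a map over P itself.
lemma pv_map_get {β : Type} (xs : List (List Int)) (g : List Int → β) :
    (PySem.List.pyRange 0 (xs.length : Int) 1).map (fun i => g (PySem.List.pyGetD xs i [])) = xs.map g := by
  have h : (fun i => g (PySem.List.pyGetD xs i [])) = g ∘ (fun i => PySem.List.pyGetD xs i []) := rfl
  rw [h, ← List.map_map, ← PySem.List.len_eq, PySem.List.map_pyGetD_pyRange_zero]

lemma pv_outer {P : List (List Int)} (e : List Int → List Int → Int) :
    (PySem.List.pyRange 0 (P.length : Int) 1).map (fun i =>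
      (PySem.List.pyRange 0 (P.length : Int) 1).map (fun j =>
        e (PySem.List.pyGetD P i []) (PySem.List.pyGetD P j [])))
    = P.map (fun x => P.map (fun y => e x y)) := by
  rw [← pv_map_get P (g := fun x => P.map (fun y => e x y))]
  exact List.map_congr_left (fun i _ => pv_map_get P (g := fun y => e (PySem.List.pyGetD P i []) y))

-- A's subtraction loop equals init minus twice the sum of per-element minima.
lemma pv_foldl_sub (cx cy : Int → Int) :
    ∀ (s : List Int) (init : Int),
      s.foldl (fun dk p => if cx p > cy p then dk - 2 * cy p else dk - 2 * cx p) init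
        = init - 2 * (s.map (fun p => min (cx p) (cy p))).sum
  | [], init => by simp
  | p :: t, init => by
    simp only [List.foldl_cons, List.map_cons, List.sum_cons]
    split_ifs with h
    · rw [pv_foldl_sub cx cy t, min_eq_right (le_of_lt h)]; ring
    · rw [pv_foldl_sub cx cy t, min_eq_left (by omega)]; ring

-- the two-pointer merge on sorted lists counts the multiset-intersection cardinality
lemma pv_common_card :
    ∀ (xs ys : List Int), xs.Pairwise (· ≤ ·) → ys.Pairwise (· ≤ ·) →
      pvCommon xs ys = (((xs : Multiset Int) ∩ (ys : Multiset Int)).card : Int)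
  | [], ys, _, _ => by simp [pvCommon]
  | x :: xs, [], _, _ => by simp [pvCommon]
  | x :: xs, y :: ys, hx, hy => by
    rw [pvCommon]
    rcases List.pairwise_cons.mp hx with ⟨hxall, hx'⟩
    rcases List.pairwise_cons.mp hy with ⟨hyall, hy'⟩
    split_ifs with h1 h2
    · -- x < y : x not in y::ys
      have hnot : x ∉ ((y :: ys : List Int) : Multiset Int) := by
        simp only [Multiset.mem_coe, List.mem_cons]
        rintro (rfl | hm)
        · exact lt_irrefl x h1
        · exact absurd (lt_of_lt_of_le h1 (hyall x hm)) (lt_irrefl x)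
      rw [pv_common_card xs (y :: ys) hx' hy]
      rw [show ((x :: xs : List Int) : Multiset Int) = x ::ₘ (xs : Multiset Int) from rfl]
      rw [Multiset.cons_inter_of_neg _ hnot]
    · -- y < x : symmetric, via commutativity of ∩
      have hnot : y ∉ ((x :: xs : List Int) : Multiset Int) := by
        simp only [Multiset.mem_coe, List.mem_cons]
        rintro (rfl | hm)
        · exact absurd h2 (lt_irrefl y)
        · exact absurd (lt_of_lt_of_le h2 (hxall y hm)) (lt_irrefl y)
      have hstep : ((x :: xs : List Int) : Multiset Int) ∩ ((y :: ys : List Int) : Multiset Int)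
          = ((x :: xs : List Int) : Multiset Int) ∩ ((ys : List Int) : Multiset Int) := by
        rw [Multiset.inter_comm,
            show ((y :: ys : List Int) : Multiset Int) = y ::ₘ (ys : Multiset Int) from rfl,
            Multiset.cons_inter_of_neg _ hnot, Multiset.inter_comm]
      rw [pv_common_card (x :: xs) ys hx hy', hstep]
    · -- x = y
      have hxy : x = y := le_antisymm (not_lt.mp h2) (not_lt.mp h1)
      subst hxy
      have hmem : x ∈ ((x :: ys : List Int) : Multiset Int) := by simp
      rw [pv_common_card xs ys hx' hy']
      rw [show ((x :: xs : List Int) : Multiset Int) = x ::ₘ (xs : Multiset Int) from rfl]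
      rw [Multiset.cons_inter_of_pos _ hmem]
      have : ((x :: ys : List Int) : Multiset Int).erase x = (ys : Multiset Int) := by
        rw [show ((x :: ys : List Int) : Multiset Int) = x ::ₘ (ys : Multiset Int) from rfl]
        exact Multiset.erase_cons_head x _
      rw [this, Multiset.card_cons]
      push_cast
      ring

-- the sum of per-element minima over the support of x is the intersection cardinality
lemma pv_sum_min_card (x y : List Int) :
    ((PySem.Set.ofList x).map (fun p => min ((x.count p : Int)) ((y.count p : Int)))).sum
      = (((x : Multiset Int) ∩ (y : Multiset Int)).card : Int) := by
  have hnd : (PySem.Set.ofList x).Nodup := PySem.Set.nodup_ofList x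
  have hsum : ((PySem.Set.ofList x).map (fun p => min ((x.count p : Int)) ((y.count p : Int)))).sum
      = ∑ p ∈ (PySem.Set.ofList x).toFinset, min ((x.count p : Int)) ((y.count p : Int)) := by
    rw [List.sum_toFinset _ hnd]
  rw [hsum]
  have hfs : (PySem.Set.ofList x).toFinset = x.toFinset := by
    ext p
    simp [PySem.Set.mem_ofList]
  rw [hfs]
  have hcard : ((x : Multiset Int) ∩ (y : Multiset Int)).card
      = ∑ p ∈ x.toFinset, ((x : Multiset Int) ∩ (y : Multiset Int)).count p := by
    rw [← Multiset.toFinset_sum_count_eq ((x : Multiset Int) ∩ (y : Multiset Int))]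
    apply Finset.sum_subset
    · intro p hp
      simp only [Multiset.mem_toFinset, Multiset.mem_inter] at hp
      simpa [List.mem_toFinset] using hp.1
    · intro p _ hp
      rw [Multiset.count_eq_zero]
      simpa [Multiset.mem_toFinset] using hp
  rw [hcard]
  push_cast
  refine Finset.sum_congr rfl (fun p _ => ?_)
  rw [Multiset.count_inter]
  push_cast
  simp [Multiset.coe_count]

-- per-pair: A's inner computation equals B's per-pair formula on the sorted copies
lemma pv_pair (x y : List Int) :
    (x.foldl (fun acc p => if acc.contains p then acc else acc ++ [p]) []).foldl
      (fun dk p =>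
        if (x.count p : Int) > (y.count p : Int) then dk - 2 * (y.count p : Int)
        else dk - 2 * (x.count p : Int))
      ((x.length : Int) + (y.length : Int))
    = ((PySem.List.sorted x (fun x => x) false).length : Int)
      + ((PySem.List.sorted y (fun x => x) false).length : Int)
      - 2 * pvCommon (PySem.List.sorted x (fun x => x) false) (PySem.List.sorted y (fun x => x) false) := by
  have hsupp : x.foldl (fun acc p => if acc.contains p then acc else acc ++ [p]) []
      = PySem.Set.ofList x := by
    rw [PySem.Set.ofList_eq_foldl]; rfl
  rw [hsupp, pv_foldl_sub]
  have hpx := PySem.List.sorted_perm x (fun x => x) false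
  have hpy := PySem.List.sorted_perm y (fun x => x) false
  rw [pv_common_card _ _ (PySem.List.sorted_pairwise x (fun x => x)) (PySem.List.sorted_pairwise y (fun x => x))]
  rw [show ((PySem.List.sorted x (fun x => x) false : List Int) : Multiset Int) = (x : Multiset Int) from Quot.sound hpx]
  rw [show ((PySem.List.sorted y (fun x => x) false : List Int) : Multiset Int) = (y : Multiset Int) from Quot.sound hpy]
  rw [hpx.length_eq, hpy.length_eq, pv_sum_min_card]

-- ===== VERDICT =====
theorem getkRFmeasure_rooted_spec : Claim_equal_getkRFmeasure_rooted := by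
  intro P _
  unfold Spec_getkRFmeasure_rooted getkRFmeasure_rooted getkRFmeasure_rooted_alt
  simp only [PySem.List.foldl_append_singleton_eq_map, List.nil_append]
  refine Eq.trans
    (pv_outer (P := P) (fun x y =>
      (x.foldl (fun acc p => if acc.contains p then acc else acc ++ [p]) []).foldl
        (fun dk p =>
          if (x.count p : Int) > (y.count p : Int) then dk - 2 * (y.count p : Int)
          else dk - 2 * (x.count p : Int))
        ((x.length : Int) + (y.length : Int)))) ?_
  simp only [List.map_map, Function.comp_def]
  exact List.map_congr_left (fun x _ => List.map_congr_left (fun y _ => pv_pair x y))
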